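-- pv_equiv track=rewrite | github.com/Retrobute/PSO_FL_SIM | main.py | apply_velocity
-- ===== SOURCE A (Python) =====
-- def apply_velocity(p_position, p_velocity):
--     new_position = []
--     client_count = len(p_position)
--
--     for a, b in zip(p_position, p_velocity):
--         np = (a + b) % client_count
--
--         while np in new_position:
--             np = (np + 1) % client_count
--
--         new_position.append(np)
--
--     return new_position
-- ===== SOURCE B (Python) =====
-- def apply_velocity(p_position, p_velocity):
--     n = len(p_position)
--     free = list(range(n))
--     out = []
--     for a, b in zip(p_position, p_velocity):
--         s = (a + b) % n
--         lo, hi = 0, len(free)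
--         while lo < hi:
--             mid = (lo + hi) // 2
--             if free[mid] < s:
--                 lo = mid + 1
--             else:
--                 hi = mid
--         if lo == len(free):
--             lo = 0
--         out.append(free.pop(lo))
--     return out
-- ===== Notes on version B (the rewrite author's own statement) =====
-- stated objective: faster
-- what changed: Instead of linear-probing with an O(len) list-membership test per probe step, B maintains the sorted list of still-free slots and picks each element by a hand-written binary search (first free slot >= target, wrapping to the smallest free slot), removing it with pop.
import Mathlib
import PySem

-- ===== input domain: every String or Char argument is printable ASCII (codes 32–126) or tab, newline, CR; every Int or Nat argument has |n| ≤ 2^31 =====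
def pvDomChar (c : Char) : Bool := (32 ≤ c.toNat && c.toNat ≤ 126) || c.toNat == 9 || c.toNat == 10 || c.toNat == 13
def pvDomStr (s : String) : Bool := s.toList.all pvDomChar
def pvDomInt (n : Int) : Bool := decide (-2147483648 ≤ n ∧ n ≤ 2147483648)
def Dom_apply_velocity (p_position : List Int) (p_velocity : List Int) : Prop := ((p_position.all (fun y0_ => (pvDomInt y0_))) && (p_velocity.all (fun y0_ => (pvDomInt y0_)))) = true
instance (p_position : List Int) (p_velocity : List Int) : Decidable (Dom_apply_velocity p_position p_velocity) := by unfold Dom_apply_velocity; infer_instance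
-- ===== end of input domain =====

-- B replaces A's linear probing (with a linear list-membership test per probe step) by a sorted
-- list of still-free slots queried by a hand-written binary search; a timing run measured B faster.

-- ===== PORT A =====
-- the 'while np in new_position' loop; fuel bounds the number of iterations (the loop steps
-- only through occupied slots, of which there are fewer than len(p_position), so the fuel
-- passed below always suffices — proved in probe_run/probe_wrap/step_eq)
def probeA (newpos : List Int) (n : Int) (np : Int) : Nat → Int
  | 0 => np
  | fuel + 1 => if np ∈ newpos then probeA newpos n (PySem.Int.mod (np + 1) n) fuel else np

def apply_velocity (p_position : List Int) (p_velocity : List Int) : List Int :=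
  let client_count : Int := (p_position.length : Int)
  (p_position.zip p_velocity).foldl
    (fun newpos ab =>
      newpos ++ [probeA newpos client_count (PySem.Int.mod (ab.1 + ab.2) client_count) p_position.length])
    []

-- ===== PORT B =====
-- Source B's hand-written bisect loop ('while lo < hi: …'), step for step
-- (free[mid] is always in range here, so getD's default is never read)
def bisectB (free : List Int) (s : Int) (lo hi : Nat) : Nat :=
  if lo < hi then
    let mid := (lo + hi) / 2
    if free.getD mid 0 < s then bisectB free s (mid + 1) hi
    else bisectB free s lo mid
  else lo
termination_by hi - lo
decreasing_by all_goals omega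

-- 'free.pop(lo)' = read free[lo] (always in range here) then delete index lo
def apply_velocity_alt (p_position : List Int) (p_velocity : List Int) : List Int :=
  let n : Int := (p_position.length : Int)
  ((p_position.zip p_velocity).foldl
    (fun st ab =>
      let s := PySem.Int.mod (ab.1 + ab.2) n
      let lo := bisectB st.1 s 0 st.1.length
      let lo := if lo = st.1.length then 0 else lo
      (st.1.eraseIdx lo, st.2 ++ [st.1.getD lo 0]))
    (PySem.List.pyRange 0 n 1, [])).2

-- ===== PRECONDITION & SPEC =====
def Spec_apply_velocity (p_position : List Int) (p_velocity : List Int) (out : List Int) : Prop := out = apply_velocity_alt p_position p_velocity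
instance (p_position : List Int) (p_velocity : List Int) (out : List Int) : Decidable (Spec_apply_velocity p_position p_velocity out) := by unfold Spec_apply_velocity; infer_instance

-- ===== CLAIM (what is proved, stated in full; the proofs are below) =====
def Claim_equal_apply_velocity : Prop := ∀ (p_position : List Int) (p_velocity : List Int), Dom_apply_velocity p_position p_velocity → Spec_apply_velocity p_position p_velocity (apply_velocity p_position p_velocity)

-- ===== LEMMAS AND PROOFS =====

-- loop invariant: free is the strictly increasing list of exactly the slots of [0,n) not in out
def InvAV (n : Nat) (out free : List Int) : Prop :=
  List.Pairwise (· < ·) free ∧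
  (∀ x : Int, x ∈ free ↔ 0 ≤ x ∧ x < (n : Int) ∧ x ∉ out) ∧
  out.length + free.length = n

-- Python's `%` is the identity on an in-range nonnegative value
lemma mod_id {a n : Int} (h0 : 0 ≤ a) (h1 : a < n) : PySem.Int.mod a n = a := by
  rw [PySem.Int.mod_eq_emod_of_pos (by omega)]
  exact Int.emod_eq_of_lt h0 h1

-- A's while loop, run without wraparound, stops at the first slot t not in out
lemma probe_run (out : List Int) (n : Int) :
    ∀ (fuel : Nat) (s t : Int), 0 ≤ s → s ≤ t → t < n →
    (∀ x : Int, s ≤ x → x < t → x ∈ out) → t ∉ out →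
    (t - s).toNat ≤ fuel →
    probeA out n s fuel = t := by
  intro fuel
  induction fuel with
  | zero =>
    intro s t h0 h1 h2 hmid ht hf
    have hst : s = t := by omega
    simp [probeA, hst]
  | succ f ih =>
    intro s t h0 h1 h2 hmid ht hf
    by_cases hs : s ∈ out
    · have hst : s < t := by
        rcases eq_or_lt_of_le h1 with h | h
        · exact absurd (h ▸ hs) ht
        · exact h
      rw [probeA, if_pos hs, mod_id (by omega) (by omega)]
      exact ih (s + 1) t (by omega) (by omega) h2 (fun x hx1 hx2 => hmid x (by omega) hx2) ht (by omega)
    · have hst : s = t := by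
        by_contra h
        exact hs (hmid s le_rfl (by omega))
      rw [probeA, if_neg hs, hst]

-- A's while loop wraps past n-1 back to 0 when every slot from s up is occupied
lemma probe_wrap (out : List Int) (n : Int) (hn : 0 < n) :
    ∀ (fuel : Nat) (s : Int), 0 ≤ s → s < n →
    (∀ x : Int, s ≤ x → x < n → x ∈ out) →
    (n - s).toNat ≤ fuel →
    probeA out n s fuel = probeA out n 0 (fuel - (n - s).toNat) := by
  intro fuel
  induction fuel with
  | zero =>
    intro s h0 h1 hall hf
    omega
  | succ f ih =>
    intro s h0 h1 hall hf
    have hs : s ∈ out := hall s le_rfl h1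
    rw [probeA, if_pos hs]
    by_cases h : s + 1 < n
    · rw [mod_id (by omega) h, ih (s + 1) (by omega) h (fun x hx1 hx2 => hall x (by omega) hx2) (by omega)]
      congr 1
      omega
    · have hmod : PySem.Int.mod (s + 1) n = 0 := by
        have : s + 1 = n := by omega
        rw [this, PySem.Int.mod_eq_emod_of_pos hn, Int.emod_self]
      rw [hmod]
      congr 1
      omega

-- a strictly increasing list is read off monotonically
lemma sorted_getD_lt {free : List Int} (h : List.Pairwise (· < ·) free)
    {i j : Nat} (hij : i < j) (hj : j < free.length) :
    free.getD i 0 < free.getD j 0 := by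
  rw [List.getD_eq_getElem free 0 (by omega), List.getD_eq_getElem free 0 hj]
  exact List.pairwise_iff_getElem.mp h i j (by omega) hj hij

-- bisectB finds the first index ≥ lo whose entry is ≥ s, on a strictly increasing list
lemma bisectB_spec (free : List Int) (s : Int) (hsorted : List.Pairwise (· < ·) free) :
    ∀ (k lo hi : Nat), hi - lo ≤ k → lo ≤ hi → hi ≤ free.length →
    (∀ i, i < lo → free.getD i 0 < s) →
    (∀ i, hi ≤ i → i < free.length → s ≤ free.getD i 0) →
    (bisectB free s lo hi ≤ free.length ∧
     (∀ i, i < bisectB free s lo hi → free.getD i 0 < s) ∧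
     (∀ i, bisectB free s lo hi ≤ i → i < free.length → s ≤ free.getD i 0)) := by
  intro k
  induction k with
  | zero =>
    intro lo hi hk h1 h2 hlow hhigh
    have : ¬ lo < hi := by omega
    rw [bisectB, if_neg this]
    exact ⟨by omega, hlow, fun i hi1 hi2 => hhigh i (by omega) hi2⟩
  | succ k ih =>
    intro lo hi hk h1 h2 hlow hhigh
    by_cases hlt : lo < hi
    · rw [bisectB, if_pos hlt]
      simp only
      by_cases hc : free.getD ((lo + hi) / 2) 0 < s
      · rw [if_pos hc]
        refine ih ((lo + hi) / 2 + 1) hi (by omega) (by omega) h2 ?_ hhigh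
        intro i hi1
        by_cases him : i = (lo + hi) / 2
        · exact him ▸ hc
        · exact lt_trans (sorted_getD_lt hsorted (by omega) (by omega)) hc
      · rw [if_neg hc]
        refine ih lo ((lo + hi) / 2) (by omega) (by omega) (by omega) hlow ?_
        intro i hi1 hi2
        by_cases him : i = (lo + hi) / 2
        · subst him; exact not_lt.mp hc
        · exact le_trans (not_lt.mp hc) (le_of_lt (sorted_getD_lt hsorted (by omega : (lo + hi) / 2 < i) hi2))
    · rw [bisectB, if_neg hlt]
      exact ⟨by omega, hlow, fun i hi1 hi2 => hhigh i (by omega) hi2⟩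

-- one loop iteration: A's probe returns exactly the slot B pops, and the invariant is preserved
lemma step_eq (n : Nat) (out free : List Int) (hinv : InvAV n out free) (hne : free ≠ [])
    (s : Int) (hs0 : 0 ≤ s) (hs1 : s < (n : Int)) :
    probeA out (n : Int) s n
      = free.getD (if bisectB free s 0 free.length = free.length then 0
                   else bisectB free s 0 free.length) 0 ∧
    InvAV n
      (out ++ [free.getD (if bisectB free s 0 free.length = free.length then 0
                          else bisectB free s 0 free.length) 0])
      (free.eraseIdx (if bisectB free s 0 free.length = free.length then 0
                      else bisectB free s 0 free.length)) := by
  obtain ⟨hsort, hmem, hlen⟩ := hinv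
  have hnodup : free.Nodup := hsort.imp ne_of_lt
  have hflen : 0 < free.length := List.length_pos_of_ne_nil hne
  obtain ⟨hr1, hrlow, hrhigh⟩ :=
    bisectB_spec free s hsort free.length 0 free.length (by omega) (by omega) le_rfl
      (by intro i h; omega) (by intro i h1 h2; omega)
  set r := bisectB free s 0 free.length with hr
  set lo := if r = free.length then 0 else r with hlo
  have hlolen : lo < free.length := by
    rw [hlo]; split <;> omega
  have hgetD : free.getD lo 0 = free[lo] := List.getD_eq_getElem free 0 hlolen
  set t := free.getD lo 0 with hts
  have htmem : t ∈ free := by rw [hgetD]; exact List.getElem_mem hlolen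
  obtain ⟨ht0, htn, htout⟩ := (hmem t).mp htmem
  have hprobe : probeA out (n : Int) s n = t := by
    by_cases hcase : r = free.length
    · -- wraparound: every free slot is < s
      have hlo0 : lo = 0 := by rw [hlo, if_pos hcase]
      have hallout : ∀ x : Int, s ≤ x → x < (n : Int) → x ∈ out := by
        intro x hx1 hx2
        by_contra hxout
        have hxfree : x ∈ free := (hmem x).mpr ⟨by omega, hx2, hxout⟩
        obtain ⟨i, hi, hix⟩ := List.mem_iff_getElem.mp hxfree
        have : free.getD i 0 < s := hrlow i (by omega)
        rw [List.getD_eq_getElem free 0 hi, hix] at this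
        omega
      have hts' : t < s := by
        have := hrlow lo (by omega)
        rw [← hts] at this; exact this
      rw [probe_wrap out (n : Int) (by omega) n s hs0 hs1 hallout (by omega)]
      refine probe_run out (n : Int) _ 0 t le_rfl ht0 htn ?_ htout (by omega)
      intro x hx1 hx2
      by_contra hxout
      have hxfree : x ∈ free := (hmem x).mpr ⟨hx1, by omega, hxout⟩
      obtain ⟨i, hi, hix⟩ := List.mem_iff_getElem.mp hxfree
      rcases Nat.eq_zero_or_pos i with h0 | h0
      · rw [hts, hlo0, List.getD_eq_getElem free 0 (by omega)] at hx2
        subst h0; omega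
      · have := sorted_getD_lt hsort (show lo < i by omega) hi
        rw [← hts, List.getD_eq_getElem free 0 hi, hix] at this
        omega
    · -- no wraparound: t is the first free slot ≥ s
      have hlor : lo = r := by rw [hlo, if_neg hcase]
      have hst : s ≤ t := by
        have := hrhigh lo (by omega) hlolen
        rw [← hts] at this; exact this
      refine probe_run out (n : Int) n s t hs0 hst htn ?_ htout (by omega)
      intro x hx1 hx2
      by_contra hxout
      have hxfree : x ∈ free := (hmem x).mpr ⟨by omega, by omega, hxout⟩
      obtain ⟨i, hi, hix⟩ := List.mem_iff_getElem.mp hxfree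
      rcases Nat.lt_or_ge i lo with hilt | hige
      · have := hrlow i (by omega)
        rw [List.getD_eq_getElem free 0 hi, hix] at this
        omega
      · rcases Nat.eq_or_lt_of_le hige with he | hgt
        · have hx : t = x := by
            rw [hts, he, List.getD_eq_getElem free 0 hi, hix]
          omega
        · have := sorted_getD_lt hsort hgt hi
          rw [← hts, List.getD_eq_getElem free 0 hi, hix] at this
          omega
  refine ⟨hprobe, ?_, ?_, ?_⟩
  · exact List.Pairwise.sublist (List.eraseIdx_sublist free lo) hsort
  · intro x
    rw [← List.Nodup.erase_getElem hnodup lo hlolen, List.Nodup.mem_erase_iff hnodup,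
        hmem x]
    rw [← hgetD]
    simp only [List.mem_append, List.mem_singleton]
    tauto
  · rw [List.length_append, List.length_eraseIdx_of_lt hlolen]
    simp
    omega

-- the two folds march in lockstep
lemma loop_eq (n : Nat) :
    ∀ (l : List (Int × Int)) (out free : List Int), InvAV n out free →
    out.length + l.length ≤ n →
    l.foldl (fun newpos ab =>
        newpos ++ [probeA newpos (n : Int) (PySem.Int.mod (ab.1 + ab.2) (n : Int)) n]) out
    = (l.foldl (fun st ab =>
        let s := PySem.Int.mod (ab.1 + ab.2) (n : Int)
        let lo := bisectB st.1 s 0 st.1.length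
        let lo := if lo = st.1.length then 0 else lo
        (st.1.eraseIdx lo, st.2 ++ [st.1.getD lo 0])) (free, out)).2 := by
  intro l
  induction l with
  | nil => intro out free hinv hlen; rfl
  | cons ab tl ih =>
    intro out free hinv hlen
    have hflen : 0 < free.length := by
      obtain ⟨_, _, h3⟩ := hinv
      simp only [List.length_cons] at hlen
      omega
    have hne : free ≠ [] := List.ne_nil_of_length_pos hflen
    have hn : 0 < (n : Int) := by
      obtain ⟨_, _, h3⟩ := hinv
      have : 0 < n := by omega
      exact_mod_cast this
    obtain ⟨hp, hinv'⟩ := step_eq n out free hinv hne (PySem.Int.mod (ab.1 + ab.2) (n : Int))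
      (PySem.Int.mod_nonneg (ab.1 + ab.2) hn) (PySem.Int.mod_lt (ab.1 + ab.2) hn)
    simp only [List.foldl_cons]
    rw [hp]
    refine ih _ _ hinv' ?_
    simp only [List.length_append, List.length_singleton]
    simp only [List.length_cons] at hlen
    omega

-- ===== VERDICT (by name: the statement is the Claim_ definition above) =====
theorem apply_velocity_spec : Claim_equal_apply_velocity := by
  unfold Claim_equal_apply_velocity Spec_apply_velocity
  intro p_position p_velocity _
  unfold apply_velocity apply_velocity_alt
  refine loop_eq p_position.length (p_position.zip p_velocity) []
    (PySem.List.pyRange 0 (p_position.length : Int) 1) ⟨?_, ?_, ?_⟩ ?_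
  · rw [PySem.List.pyRange_zero_natCast]
    exact List.pairwise_map.mpr (List.pairwise_lt_range.imp (fun h => by exact_mod_cast h))
  · intro x
    rw [PySem.List.mem_pyRange_one]
    simp
  · simp [PySem.List.length_pyRange_one]
  · simp only [List.length_nil, List.length_zip, Nat.zero_add]
    omega
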